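-- pv_equiv track=rewrite | github.com/NUMNIMx/Robot | code_explorer/plot_graph.py | assign_x_values
-- ===== SOURCE A (Python) =====
-- def assign_x_values(y_values):
--     x_values = [5]  # เริ่มต้นที่ 5
--     for i in range(1, len(y_values)):
--         if y_values[i] != y_values[i-1]:
--             x_values.append(x_values[-1] + 5)
--         else:
--             x_values.append(x_values[-1])
--     return x_values
-- ===== SOURCE B (Python) =====
-- def assign_x_values(y_values):
--     # two-stage: detect changes to a delta list, then prefix-sum it
--     deltas = [5] + [5 if b != a else 0 for a, b in zip(y_values, y_values[1:])]
--     x_values = []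
--     total = 0
--     for d in deltas:
--         total += d
--         x_values.append(total)
--     return x_values
-- ===== Notes on version B (the rewrite author's own statement) =====
-- stated objective: alternative
-- what changed: replaces the single stateful loop reading the last appended element with a two-stage decomposition: a change-detection pass over adjacent pairs producing a delta list, then a separate prefix-sum accumulation
import Mathlib
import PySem

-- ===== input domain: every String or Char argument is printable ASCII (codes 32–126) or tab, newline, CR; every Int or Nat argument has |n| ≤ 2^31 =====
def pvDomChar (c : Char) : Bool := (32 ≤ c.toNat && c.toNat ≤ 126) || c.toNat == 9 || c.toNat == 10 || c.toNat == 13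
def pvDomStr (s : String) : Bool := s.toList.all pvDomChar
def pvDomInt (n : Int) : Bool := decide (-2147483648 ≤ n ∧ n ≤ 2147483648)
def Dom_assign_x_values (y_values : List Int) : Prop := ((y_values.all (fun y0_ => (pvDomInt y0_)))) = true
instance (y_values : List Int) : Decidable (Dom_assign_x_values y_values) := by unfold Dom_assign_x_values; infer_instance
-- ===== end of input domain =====

-- B replaces A's single stateful loop (reading x_values[-1]) with a two-stage decomposition:
-- a change-detection pass producing a delta list, then a separate prefix-sum accumulation.


-- ===== PORT A =====
-- literal port: x_values = [5]; for i in range(1, len(y_values)): append x_values[-1] (+5 on change)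
-- pyGetD is used for y_values[i], y_values[i-1], x_values[-1]; all indices are always in range.
def assign_x_values (y_values : List Int) : List Int :=
  (PySem.List.pyRange 1 (y_values.length : Int) 1).foldl
    (fun x_values i =>
      if (PySem.List.pyGetD y_values i 0) != (PySem.List.pyGetD y_values (i - 1) 0) then
        x_values ++ [PySem.List.pyGetD x_values (-1) 0 + 5]
      else
        x_values ++ [PySem.List.pyGetD x_values (-1) 0])
    [5]

-- ===== PORT B =====
-- deltas = [5] + [5 if b != a else 0 for a, b in zip(y_values, y_values[1:])]
def pvDeltas (y_values : List Int) : List Int :=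
  5 :: (y_values.zip (y_values.drop 1)).map (fun p => if p.2 != p.1 then (5 : Int) else 0)

-- then a separate accumulation loop over deltas
def assign_x_values_alt (y_values : List Int) : List Int :=
  ((pvDeltas y_values).foldl
    (fun st d => (st.1 + d, st.2 ++ [st.1 + d]))
    ((0 : Int), ([] : List Int))).2

-- ===== PRECONDITION & SPEC =====
def Spec_assign_x_values (y_values : List Int) (out : List Int) : Prop := out = assign_x_values_alt y_values
instance (y_values : List Int) (out : List Int) : Decidable (Spec_assign_x_values y_values out) := by unfold Spec_assign_x_values; infer_instance

-- ===== CLAIM (what is proved, stated in full; the proofs are below) =====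
def Claim_equal_assign_x_values : Prop := ∀ (y_values : List Int), Dom_assign_x_values y_values → Spec_assign_x_values y_values (assign_x_values y_values)

-- ===== LEMMAS AND PROOFS =====

-- reference accumulator: accum t ds = running prefix sums of ds starting from t
def pvAccum (t : Int) : List Int → List Int
  | [] => []
  | d :: ds => (t + d) :: pvAccum (t + d) ds

-- change list of y (B's comprehension body)
def pvChg (y : List Int) : List Int :=
  (y.zip (y.drop 1)).map (fun p => if p.2 != p.1 then (5 : Int) else 0)

lemma pvChg_length (y : List Int) : (pvChg y).length = y.length - 1 := by
  simp [pvChg]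

-- B's pair-state fold is accumulation
lemma B_fold (ds : List Int) : ∀ (t : Int) (acc : List Int),
    (ds.foldl (fun st d => (st.1 + d, st.2 ++ [st.1 + d])) (t, acc)).2 = acc ++ pvAccum t ds := by
  induction ds with
  | nil => intro t acc; simp [pvAccum]
  | cons d ds ih =>
    intro t acc
    simp only [List.foldl_cons, pvAccum]
    rw [ih]
    simp

lemma pvChg_getElem (y : List Int) (k : Nat) (hk : k < (pvChg y).length)
    (h1 : k + 1 < y.length) (h0 : k < y.length) :
    (pvChg y)[k] = if y[k+1] != y[k] then (5 : Int) else 0 := by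
  simp [pvChg, List.getElem_zip]

-- A's index fold, generalized: starting from any nonempty xs with last element t,
-- folding indices k+1 .. len-1 appends the accumulation of the remaining change deltas
lemma A_fold (y : List Int) : ∀ (m k : Nat), y.length - (k + 1) = m →
    ∀ (xs : List Int) (t : Int), xs.getLast? = some t →
    (PySem.List.pyRange ((k : Int) + 1) (y.length : Int) 1).foldl
      (fun x_values i =>
        if (PySem.List.pyGetD y i 0) != (PySem.List.pyGetD y (i - 1) 0) then
          x_values ++ [PySem.List.pyGetD x_values (-1) 0 + 5]
        else
          x_values ++ [PySem.List.pyGetD x_values (-1) 0])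
      xs = xs ++ pvAccum t ((pvChg y).drop k) := by
  intro m
  induction m with
  | zero =>
    intro k hm xs t hlast
    have h1 : (y.length : Int) ≤ (k : Int) + 1 := by exact_mod_cast Int.ofNat_le.mpr (by omega)
    rw [PySem.List.pyRange_one_eq_nil h1]
    have h2 : (pvChg y).drop k = [] := by
      apply List.drop_eq_nil_of_le; rw [pvChg_length]; omega
    simp [h2, pvAccum]
  | succ m ih =>
    intro k hm xs t hlast
    have hky1 : k + 1 < y.length := by omega
    have hky : k < y.length := by omega
    have hk1 : ((k : Int) + 1) < (y.length : Int) := by exact_mod_cast Int.ofNat_lt.mpr (by omega)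
    rw [PySem.List.pyRange_one_cons hk1]
    have hxs : xs ≠ [] := by intro h; simp [h] at hlast
    have hkc : k < (pvChg y).length := by rw [pvChg_length]; omega
    have hdrop : (pvChg y).drop k = (pvChg y)[k] :: (pvChg y).drop (k + 1) := by
      rw [List.getElem_cons_drop]
    have hy1 : PySem.List.pyGetD y ((k : Int) + 1) 0 = y[k+1] := by
      have hc : ((k : Int) + 1) = ((k + 1 : Nat) : Int) := by push_cast; ring
      rw [hc, PySem.List.pyGetD_natCast, List.getD_eq_getElem _ _ hky1]
    have hy0 : PySem.List.pyGetD y ((k : Int) + 1 - 1) 0 = y[k] := by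
      have hc : ((k : Int) + 1 - 1) = ((k : Nat) : Int) := by ring
      rw [hc, PySem.List.pyGetD_natCast, List.getD_eq_getElem _ _ hky]
    have hlastv : PySem.List.pyGetD xs (-1) 0 = t := by
      rw [PySem.List.pyGetD_neg_one xs 0 hxs]
      rw [List.getLast?_eq_some_getLast hxs, Option.some.injEq] at hlast
      exact hlast
    simp only [List.foldl_cons, hy1, hy0, hlastv]
    have hstep : (if (y[k+1] != y[k]) then xs ++ [t + 5] else xs ++ [t])
        = xs ++ [t + (pvChg y)[k]] := by
      rw [pvChg_getElem y k hkc hky1 hky]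
      by_cases h : y[k+1] = y[k] <;> simp [h]
    rw [hstep]
    have hcast : ((k : Int) + 1 + 1) = (((k + 1 : Nat) : Int) + 1) := by push_cast; ring
    rw [hcast, ih (k + 1) (by omega) (xs ++ [t + (pvChg y)[k]]) (t + (pvChg y)[k]) (by simp),
        hdrop]
    simp [pvAccum]

-- ===== VERDICT (by name: the statement is the Claim_ definition above) =====
theorem assign_x_values_spec : Claim_equal_assign_x_values := by
  intro y _
  unfold Spec_assign_x_values assign_x_values assign_x_values_alt pvDeltas
  rw [B_fold]
  have hA := A_fold y (y.length - 1) 0 (by omega) [5] 5 (by simp)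
  simp only [Nat.cast_zero, zero_add, List.drop_zero] at hA
  rw [hA]
  simp [pvAccum, pvChg]
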